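-- pv_equiv track=rewrite | github.com/pypi-data/pypi-mirror-385 | packages/ami-crypto-next/ami_crypto_next-0.1.0-py3-none-any.whl/src/ami_crypto_next.py | _base28_encode_value
-- ===== SOURCE A (Python) =====
-- _BASE28_ALPHABET = "0123456789abcdefghijklmnopqr"
--
-- _BASE28_RADIX = 28
--
-- def _base28_encode_value(val: int, width: int = 2) -> str:
--     assert val >= 0
--     digits = []
--     n = val
--     while n:
--         digits.append(_BASE28_ALPHABET[n % _BASE28_RADIX])
--         n //= _BASE28_RADIX
--     if not digits:
--         digits = ["0"]
--     out = "".join(reversed(digits))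
--     # 固定宽度，左侧 0 填充至 width 位
--     if len(out) < width:
--         out = "0" * (width - len(out)) + out
--     return out
-- ===== SOURCE B (Python) =====
-- _BASE28_ALPHABET = "0123456789abcdefghijklmnopqr"
--
-- _BASE28_RADIX = 28
--
-- def _base28_encode_value(val: int, width: int = 2) -> str:
--     assert val >= 0
--     # phase 1: count the base-28 digits of val, keeping p = RADIX ** ndigits
--     ndigits = 1
--     p = _BASE28_RADIX
--     while p <= val:
--         ndigits += 1
--         p *= _BASE28_RADIX
--     # phase 2: emit most-significant digit first with a descending power;
--     # no digit list is reversed, padding is pure length arithmetic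
--     out = ""
--     pw = p // _BASE28_RADIX
--     while pw > 0:
--         out += _BASE28_ALPHABET[(val // pw) % _BASE28_RADIX]
--         pw //= _BASE28_RADIX
--     return "0" * (max(width, ndigits) - ndigits) + out
-- ===== Notes on version B (the rewrite author's own statement) =====
-- stated objective: alternative
-- what changed: Replaces the LSB-first digit list + reversed() + explicit left-pad concatenation by a two-phase MSB-first scheme: first count the base-28 digits by growing a power, then emit each digit directly via (val // 28**pos) % 28 over the final length, so padding falls out of the length and no list or reversal exists.
import Mathlib
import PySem

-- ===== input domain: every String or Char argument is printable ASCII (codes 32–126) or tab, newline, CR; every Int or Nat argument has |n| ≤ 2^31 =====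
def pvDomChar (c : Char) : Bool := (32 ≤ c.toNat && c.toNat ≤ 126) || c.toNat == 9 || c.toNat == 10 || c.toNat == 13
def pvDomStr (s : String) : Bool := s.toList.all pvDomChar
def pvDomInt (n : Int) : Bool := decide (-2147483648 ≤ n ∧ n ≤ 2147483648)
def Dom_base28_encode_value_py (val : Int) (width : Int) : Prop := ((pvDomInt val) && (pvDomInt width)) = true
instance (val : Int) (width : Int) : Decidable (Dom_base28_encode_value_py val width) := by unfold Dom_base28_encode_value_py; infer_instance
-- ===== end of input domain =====

-- B replaces A's LSB-first digit list + reversed() + pad-the-joined-string by a two-phase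
-- MSB-first scheme (count the digits keeping the power, then emit each digit with a
-- descending power; padding is length arithmetic); objective: alternative.

def pvAlpha : List Char := "0123456789abcdefghijklmnopqr".toList

-- ===== PORT A =====
-- the while-n loop: append ALPHABET[n % 28], n //= 28 (n ≥ 0 under Pre_, so Nat ops are exact)
def pvA_loop (n : Nat) : List Char :=
  if h : n = 0 then []
  else pvAlpha.getD (n % 28) '0' :: pvA_loop (n / 28)
decreasing_by exact Nat.div_lt_self (Nat.pos_of_ne_zero h) (by norm_num)

def base28_encode_value_py (val : Int) (width : Int) : String :=
  -- assert val >= 0 is Pre_; on it val.toNat = val and Python's % // on nonneg ints are Nat's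
  let digits := pvA_loop val.toNat
  let digits := if digits.isEmpty then ['0'] else digits
  let out := digits.reverse
  let out := if (out.length : Int) < width then
               List.replicate (width - (out.length : Int)).toNat '0' ++ out
             else out
  String.ofList out

-- ===== PORT B =====
-- phase 1: while p <= val: ndigits += 1; p *= 28, returning (ndigits, p)
-- (0 < p is a totality guard; p is always a positive power of 28 when called from the port)
def pvB_count (val p nd : Nat) : Nat × Nat :=
  if h : 0 < p ∧ p ≤ val then pvB_count val (p * 28) (nd + 1) else (nd, p)
termination_by val + 1 - p
decreasing_by
  obtain ⟨hp, hle⟩ := h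
  have : p < p * 28 := by omega
  omega

-- phase 2: while pw > 0: out += ALPHABET[(val // pw) % 28]; pw //= 28
def pvB_emit (val pw : Nat) : List Char :=
  if h : 0 < pw then pvAlpha.getD (val / pw % 28) '0' :: pvB_emit val (pw / 28)
  else []
decreasing_by exact Nat.div_lt_self h (by norm_num)

def base28_encode_value_py_alt (val : Int) (width : Int) : String :=
  let n := val.toNat
  let c := pvB_count n 28 1
  let out := pvB_emit n (c.2 / 28)
  -- "0" * k is empty for k ≤ 0, which .toNat matches
  String.ofList (List.replicate (max width (c.1 : Int) - (c.1 : Int)).toNat '0' ++ out)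

-- ===== PRECONDITION & SPEC =====
-- A raises AssertionError for val < 0; exactly those inputs are excluded.
def Pre_base28_encode_value_py (val : Int) (width : Int) : Prop := 0 ≤ val
instance (val : Int) (width : Int) : Decidable (Pre_base28_encode_value_py val width) := by
  unfold Pre_base28_encode_value_py; infer_instance
def pvWitness_base28_encode_value_py : Int × Int := (30, 2)

def Spec_base28_encode_value_py (val : Int) (width : Int) (out : String) : Prop := out = base28_encode_value_py_alt val width
instance (val : Int) (width : Int) (out : String) : Decidable (Spec_base28_encode_value_py val width out) := by unfold Spec_base28_encode_value_py; infer_instance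

-- ===== CLAIM (what is proved, stated in full; the proofs are below) =====
def Claim_equal_base28_encode_value_py : Prop := ∀ (val : Int) (width : Int), Dom_base28_encode_value_py val width → Pre_base28_encode_value_py val width → Spec_base28_encode_value_py val width (base28_encode_value_py val width)

-- ===== LEMMAS AND PROOFS =====

-- the MSB-first digit string of the low `len` base-28 digits of n
def pvMsb (len n : Nat) : List Char :=
  (List.range len).map (fun j => pvAlpha.getD (n / 28 ^ (len - 1 - j) % 28) '0')

theorem pvMsb_succ (m n : Nat) :
    pvMsb (m + 1) n = pvMsb m (n / 28) ++ [pvAlpha.getD (n % 28) '0'] := by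
  unfold pvMsb
  rw [List.range_succ, List.map_append]
  congr 1
  · apply List.map_congr_left
    intro j hj
    have hj' : j < m := List.mem_range.mp hj
    have hexp : 28 ^ (m + 1 - 1 - j) = 28 * 28 ^ (m - 1 - j) := by
      have : m + 1 - 1 - j = (m - 1 - j) + 1 := by omega
      rw [this, pow_succ]; ring
    rw [hexp, Nat.div_div_eq_div_mul, Nat.mul_comm 28 (28 ^ (m - 1 - j)),
        ← Nat.div_div_eq_div_mul]
  · simp

theorem pvMsb_cons (m n : Nat) :
    pvMsb (m + 1) n = pvAlpha.getD (n / 28 ^ m % 28) '0' :: pvMsb m n := by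
  unfold pvMsb
  rw [List.range_succ_eq_map, List.map_cons, List.map_map]
  congr 1
  apply List.map_congr_left
  intro j _
  simp only [Function.comp_apply]
  have he : m + 1 - 1 - (j + 1) = m - 1 - j := by omega
  rw [he]

theorem pvA_loop_rev (n : Nat) (hn : n ≠ 0) :
    (pvA_loop n).reverse = pvMsb (pvA_loop n).length n := by
  induction n using Nat.strong_induction_on with
  | _ n ih =>
    rw [pvA_loop, dif_neg hn]
    by_cases h2 : n / 28 = 0
    · rw [pvA_loop, dif_pos h2]
      simp [pvMsb]
    · have hlt : n / 28 < n := Nat.div_lt_self (Nat.pos_of_ne_zero hn) (by norm_num)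
      simp only [List.reverse_cons, List.length_cons]
      rw [ih (n / 28) hlt h2, pvMsb_succ]

theorem pvB_count_eq (n : Nat) : ∀ p nd, 0 < p →
    pvB_count n p nd = (nd + (pvA_loop (n / p)).length, p * 28 ^ (pvA_loop (n / p)).length) := by
  intro p nd hp
  induction p, nd using pvB_count.induct n with
  | case1 p nd h ih =>
    rw [pvB_count, dif_pos h]
    rw [ih (by omega)]
    have hq : n / p ≠ 0 := by
      have := Nat.one_le_div_iff h.1 |>.mpr h.2; omega
    conv_rhs => rw [pvA_loop, dif_neg hq]
    simp only [List.length_cons, Nat.div_div_eq_div_mul, pow_succ]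
    simp only [Prod.mk.injEq]
    exact ⟨by omega, by ring⟩
  | case2 p nd h =>
    rw [pvB_count, dif_neg h]
    have : n / p = 0 := by
      rcases Nat.lt_or_ge n p with hlt | hge
      · exact Nat.div_eq_of_lt hlt
      · exact absurd ⟨hp, hge⟩ h
    rw [this, pvA_loop]; simp

theorem pvB_emit_pow (n : Nat) : ∀ e, pvB_emit n (28 ^ e) = pvMsb (e + 1) n := by
  intro e
  induction e with
  | zero =>
    rw [pvB_emit, dif_pos (by norm_num)]
    rw [pvB_emit, dif_neg (by norm_num)]
    simp [pvMsb]
  | succ e ih =>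
    rw [pvB_emit, dif_pos (pow_pos (by norm_num) _)]
    have hdiv : 28 ^ (e + 1) / 28 = 28 ^ e := by
      rw [pow_succ, Nat.mul_div_cancel _ (by norm_num)]
    rw [hdiv, ih]
    conv_rhs => rw [pvMsb_cons]

-- A's pre-pad digit list equals the MSB form at the count B computes
theorem pvA_core (n : Nat) :
    (if (pvA_loop n).isEmpty then ['0'] else pvA_loop n).reverse
      = pvMsb (pvB_count n 28 1).1 n
    ∧ (pvB_count n 28 1).1 = 1 + (pvA_loop (n / 28)).length := by
  rw [pvB_count_eq n 28 1 (by norm_num)]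
  refine ⟨?_, rfl⟩
  by_cases hn : n = 0
  · subst hn
    simp [pvA_loop, pvMsb, pvAlpha]
  · have hne : ¬ (pvA_loop n).isEmpty := by
      rw [pvA_loop, dif_neg hn]; simp
    rw [if_neg hne]
    have hlen : (pvA_loop n).length = 1 + (pvA_loop (n / 28)).length := by
      rw [pvA_loop, dif_neg hn]; simp [Nat.add_comm]
    rw [pvA_loop_rev n hn, hlen]

-- ===== VERDICT (by name: the statement is the Claim_ definition above) =====
theorem base28_encode_value_py_spec : Claim_equal_base28_encode_value_py := by
  intro val width _ hpre
  unfold Spec_base28_encode_value_py base28_encode_value_py base28_encode_value_py_alt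
  simp only []
  set n := val.toNat with hn
  obtain ⟨hcore, hfst⟩ := pvA_core n
  set K := (pvA_loop (n / 28)).length with hK
  have hcnt : pvB_count n 28 1 = (1 + K, 28 * 28 ^ K) := pvB_count_eq n 28 1 (by norm_num)
  have hpw : (pvB_count n 28 1).2 / 28 = 28 ^ K := by
    rw [hcnt]; exact Nat.mul_div_cancel_left _ (by norm_num)
  have hemit : pvB_emit n ((pvB_count n 28 1).2 / 28) = pvMsb (1 + K) n := by
    rw [hpw, pvB_emit_pow n K, Nat.add_comm]
  congr 1
  rw [hcore, hfst, hemit]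
  have hlenM : ((pvMsb (1 + K) n).length : Int) = ((1 + K : Nat) : Int) := by simp [pvMsb]
  rw [hlenM]
  by_cases hw : ((1 + K : Nat) : Int) < width
  · rw [if_pos hw]
    congr 1
    congr 1
    omega
  · rw [if_neg hw]
    have : (max width ((1 + K : Nat) : Int) - ((1 + K : Nat) : Int)).toNat = 0 := by omega
    rw [this]
    simp
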